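-- pv_equiv track=rewrite | github.com/shubhangi9886/IMDB_movie_data | Task6.py | analyse_movies_language
-- ===== SOURCE A (Python) =====
-- def analyse_movies_language(movie_detail_lang):
--         movie_dict = {}
--         for i in movie_detail_lang:
--                 if i not in movie_dict:
--                         movie_dict[i] = 1
--                 else:
--                         movie_dict[i] +=1
--         return  movie_dict
-- ===== SOURCE B (Python) =====
-- def analyse_movies_language(movie_detail_lang):
--         # one dict comprehension: distinct values in first-appearance order, each tallied with list.count
--         return {x: movie_detail_lang.count(x) for x in dict.fromkeys(movie_detail_lang)}
-- ===== Notes on version B (the rewrite author's own statement) =====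
-- stated objective: simpler
-- what changed: Replaces the one-pass dict accumulator with a single dict comprehension over the first-occurrence-deduplicated values, tallying each with list.count (repeated rescans instead of an incremental counter).
import Mathlib
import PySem

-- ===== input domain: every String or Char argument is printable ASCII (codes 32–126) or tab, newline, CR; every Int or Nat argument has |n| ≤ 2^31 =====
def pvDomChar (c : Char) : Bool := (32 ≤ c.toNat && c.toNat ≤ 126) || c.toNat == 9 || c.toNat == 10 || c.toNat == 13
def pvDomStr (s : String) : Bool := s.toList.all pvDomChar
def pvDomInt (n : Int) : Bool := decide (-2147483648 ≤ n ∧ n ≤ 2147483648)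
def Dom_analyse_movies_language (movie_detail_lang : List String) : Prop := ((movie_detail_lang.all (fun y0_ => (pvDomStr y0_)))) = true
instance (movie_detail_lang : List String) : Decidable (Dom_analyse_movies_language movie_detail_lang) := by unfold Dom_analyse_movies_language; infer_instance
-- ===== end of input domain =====

-- B: the counting loop replaced by a dict comprehension over the deduplicated values using list.count; same result, simpler.


-- ===== PORT A =====
-- movie_dict = {}; for i: if i not in movie_dict: movie_dict[i] = 1 else: movie_dict[i] += 1; return movie_dict
def analyse_movies_language (movie_detail_lang : List String) : List (String × Int) :=
  (movie_detail_lang.foldl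
    (fun movie_dict i =>
      if ¬ (movie_dict.contains i) then movie_dict.insert i 1
      else movie_dict.modify i 0 (· + 1))
    (PySem.Dict.empty : PySem.Dict String Int)).items

-- ===== PORT B =====
-- {x: movie_detail_lang.count(x) for x in dict.fromkeys(movie_detail_lang)}
def analyse_movies_language_alt (movie_detail_lang : List String) : List (String × Int) :=
  (PySem.List.dedup movie_detail_lang).map (fun x => (x, (movie_detail_lang.count x : Int)))

-- ===== PRECONDITION & SPEC =====
def Spec_analyse_movies_language (movie_detail_lang : List String) (out : List (String × Int)) : Prop := out = analyse_movies_language_alt movie_detail_lang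
instance (movie_detail_lang : List String) (out : List (String × Int)) : Decidable (Spec_analyse_movies_language movie_detail_lang out) := by unfold Spec_analyse_movies_language; infer_instance

-- ===== CLAIM (what is proved, stated in full; the proofs are below) =====
def Claim_equal_analyse_movies_language : Prop := ∀ (movie_detail_lang : List String), Dom_analyse_movies_language movie_detail_lang → Spec_analyse_movies_language movie_detail_lang (analyse_movies_language movie_detail_lang)

-- ===== LEMMAS AND PROOFS =====
-- A's loop step is exactly Counter's step: inserting 1 at an absent key is modify with default 0.
theorem step_eq_counter_step (d : PySem.Dict String Int) (i : String) :
    (if ¬ d.contains i = true then d.insert i 1 else d.modify i 0 (· + 1)) = d.modify i 0 (· + 1) := by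
  by_cases h : d.contains i = true
  · simp [h]
  · simp only [Bool.not_eq_true] at h
    simp [h, PySem.Dict.modify, PySem.Dict.getD_of_not_contains (h := h)]


-- ===== VERDICT (by name: the statement is the Claim_ definition above) =====
theorem analyse_movies_language_spec : Claim_equal_analyse_movies_language := by
  intro xs _
  unfold Spec_analyse_movies_language analyse_movies_language analyse_movies_language_alt
  simp only [step_eq_counter_step]
  rw [← PySem.Dict.counter_eq_foldl, PySem.Dict.items_counter]
  simp [PySem.List.dedup_eq_ofList]
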